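-- pv_equiv track=rewrite | github.com/AP-MI-2021/lab-3-EcaterinaCnt | main.py | get_longest_prime_digits
-- ===== SOURCE A (Python) =====
-- def is_prime(n):
--     '''
--     Functia determina daca un numar este prim
--     :param n: numarul intreg introdus
--     :return: returneaza True daca este prim, iar False in caz contrar
--     '''
--     if n<2:
--         return False
--     for d in range(2, n):
--         if n%d==0:
--             return False
--     return True
--
-- def is_digit_prime(n):
--     '''
--     Determina daca un numar are toate cifrele prime
--     :param n: un numar intreg, pozitiv
--     :return: returneaza True daca acesta are toate cifrele prime, False in caz contrar
--     '''
--     while n>0: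
--         if is_prime(n%10)==False:
--             return False
--         n=n//10
--     return True
--
-- def get_longest_prime_digits(lst: list[int]) -> list[int]:
--     '''
--     Determina daca toate numerele sunt formate din cifre prime
--     :param lst: lista de numere intregi, pozitive
--     :return: returneaza cea mai lunga subsecventa de numere care au cifrele prime
--     '''
--     lungime = len(lst)
--     result =[]
--     for st in range(lungime):
--         for dr in range(st, lungime):
--             all_digit_prime=True
--             for numar in lst[st:dr+1]:
--                 if is_digit_prime(numar) == False:
--                     all_digit_prime=False
--                     break
--             if all_digit_prime == True:
--                 if dr-st+1>len(result):
--                     result=lst[st:dr+1]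
--     return result
-- ===== SOURCE B (Python) =====
-- def _good(n):
--     """True iff every decimal digit of n is a prime digit (vacuously true for n <= 0)."""
--     while n > 0:
--         if n % 10 not in (2, 3, 5, 7):
--             return False
--         n //= 10
--     return True
--
-- def get_longest_prime_digits(lst: list[int]) -> list[int]:
--     best_s = 0
--     best_l = 0
--     cl = 0
--     for i, x in enumerate(lst):
--         cl = cl + 1 if _good(x) else 0
--         if cl > best_l:
--             best_l = cl
--             best_s = i + 1 - cl
--     return lst[best_s:best_s + best_l]
-- ===== Notes on version B (the rewrite author's own statement) =====
-- stated objective: faster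
-- what changed: A scans every (st,dr) window and re-checks all its elements (cubic in the list length times digit count); B computes each element's all-prime-digits flag once and keeps the first longest consecutive run in a single pass.
import Mathlib
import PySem

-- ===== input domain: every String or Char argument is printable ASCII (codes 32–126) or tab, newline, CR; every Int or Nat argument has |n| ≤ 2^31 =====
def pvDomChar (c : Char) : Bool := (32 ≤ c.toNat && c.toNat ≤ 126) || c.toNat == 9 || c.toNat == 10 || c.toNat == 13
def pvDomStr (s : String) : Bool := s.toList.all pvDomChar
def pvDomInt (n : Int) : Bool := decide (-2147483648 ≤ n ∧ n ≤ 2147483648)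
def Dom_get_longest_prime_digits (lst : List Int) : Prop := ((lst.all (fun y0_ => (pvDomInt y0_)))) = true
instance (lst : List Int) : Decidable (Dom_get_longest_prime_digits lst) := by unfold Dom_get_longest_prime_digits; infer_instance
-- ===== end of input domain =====

-- B replaces A's cubic scan over all windows by one linear pass keeping the first longest run; objective: faster.


-- ===== PORT A =====
-- 'for d in range(2, n): if n % d == 0: return False' as a recursion over the range list
def pvIsPrimeLoop (n : Int) : List Int → Bool
  | [] => true
  | d :: ds => if PySem.Int.mod n d == 0 then false else pvIsPrimeLoop n ds

def is_prime (n : Int) : Bool :=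
  if n < 2 then false else pvIsPrimeLoop n (PySem.List.pyRange 2 n)

-- 'while n > 0: …; n //= 10', recursion on n
def is_digit_prime (n : Int) : Bool :=
  if h : 0 < n then
    if is_prime (PySem.Int.mod n 10) == false then false
    else is_digit_prime (PySem.Int.floordiv n 10)
  else true
termination_by n.toNat
decreasing_by
  rw [PySem.Int.floordiv_eq_ediv_of_pos (by norm_num)]
  omega

-- 'for numar in seg: if not is_digit_prime(numar): …; break' as a recursion over seg
def pvCheckLoop : List Int → Bool
  | [] => true
  | x :: xs => if is_digit_prime x == false then false else pvCheckLoop xs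

def get_longest_prime_digits (lst : List Int) : List Int :=
  let lungime : Int := lst.length
  (PySem.List.pyRange 0 lungime).foldl (fun result st =>
    (PySem.List.pyRange st lungime).foldl (fun result dr =>
      let seg := PySem.List.slice lst (some st) (some (dr + 1))
      if pvCheckLoop seg = true then
        if dr - st + 1 > (result.length : Int) then seg else result
      else result) result) []

-- ===== PORT B =====
-- 'while n > 0: if n % 10 not in (2,3,5,7): return False; n //= 10'
def pvGoodAlt (n : Int) : Bool :=
  if h : 0 < n then
    if !(PySem.Int.mod n 10 == 2 || PySem.Int.mod n 10 == 3 || PySem.Int.mod n 10 == 5 || PySem.Int.mod n 10 == 7) then false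
    else pvGoodAlt (PySem.Int.floordiv n 10)
  else true
termination_by n.toNat
decreasing_by
  rw [PySem.Int.floordiv_eq_ediv_of_pos (by norm_num)]
  omega

-- single pass with state (best_s, best_l, cl)
def get_longest_prime_digits_alt (lst : List Int) : List Int :=
  let s := (PySem.List.enumerate lst).foldl
    (fun (st : Int × Int × Int) (p : Int × Int) =>
      let cl : Int := if pvGoodAlt p.2 then st.2.2 + 1 else 0
      if cl > st.2.1 then (p.1 + 1 - cl, cl, cl) else (st.1, st.2.1, cl))
    (0, 0, 0)
  PySem.List.slice lst (some s.1) (some (s.1 + s.2.1))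

-- ===== PRECONDITION & SPEC =====
def Spec_get_longest_prime_digits (lst : List Int) (out : List Int) : Prop := out = get_longest_prime_digits_alt lst
instance (lst : List Int) (out : List Int) : Decidable (Spec_get_longest_prime_digits lst out) := by unfold Spec_get_longest_prime_digits; infer_instance

-- ===== CLAIM (what is proved, stated in full; the proofs are below) =====
def Claim_equal_get_longest_prime_digits : Prop := ∀ (lst : List Int), Dom_get_longest_prime_digits lst → Spec_get_longest_prime_digits lst (get_longest_prime_digits lst)

-- ===== LEMMAS AND PROOFS =====

-- length of the leading all-prime-digits run
def pvLead : List Int → Nat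
  | [] => 0
  | x :: xs => if is_digit_prime x then pvLead xs + 1 else 0

-- canonical run-by-run selection of the first longest run: position i, credit c (length of the
-- good run immediately before position i), best (start, length) so far
def pvSpec : List Int → Nat → Nat → Nat × Nat → Nat × Nat
  | xs, i, c, b =>
    if h : xs = [] then b
    else
      let m := pvLead xs
      let b' := if c + m > b.2 then (i - c, c + m) else b
      pvSpec (xs.drop (m + 1)) (i + m + 1) 0 b'
termination_by xs => xs.length
decreasing_by
  have : 0 < xs.length := List.length_pos_iff.mpr h
  simp [List.length_drop]; omega

lemma pvDigit_prime (n : Int) (h : 0 < n) :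
    is_prime (PySem.Int.mod n 10) = (PySem.Int.mod n 10 == 2 || PySem.Int.mod n 10 == 3 || PySem.Int.mod n 10 == 5 || PySem.Int.mod n 10 == 7) := by
  have h0 : 0 ≤ PySem.Int.mod n 10 := PySem.Int.mod_nonneg n (by norm_num)
  have h1 : PySem.Int.mod n 10 < 10 := PySem.Int.mod_lt n (by norm_num)
  set d := PySem.Int.mod n 10 with hd
  interval_cases d <;> decide

lemma pvGoodAlt_eq (n : Int) : pvGoodAlt n = is_digit_prime n := by
  induction n using pvGoodAlt.induct with
  | case1 x hx hbad =>
      rw [pvGoodAlt, is_digit_prime]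
      simp only [hx, dif_pos, if_pos hbad]
      rw [pvDigit_prime x hx]
      rw [Bool.not_eq_true'] at hbad
      rw [hbad]
      simp
  | case2 x hx hgood ih =>
      rw [pvGoodAlt, is_digit_prime]
      simp only [hx, dif_pos, if_neg hgood]
      rw [pvDigit_prime x hx]
      rw [Bool.not_eq_true, Bool.not_eq_false'] at hgood
      rw [hgood]
      rw [PySem.Int.floordiv_eq_ediv_of_pos (by norm_num)] at ih
      simp [ih]
  | case3 x hx =>
      rw [pvGoodAlt, is_digit_prime]
      simp [hx]

lemma pvLead_le (xs : List Int) : pvLead xs ≤ xs.length := by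
  induction xs with
  | nil => simp [pvLead]
  | cons x xs ih =>
      rw [pvLead]
      split_ifs <;> simp <;> omega

lemma pvCheckLoop_take (xs : List Int) (L : Nat) (h : L ≤ xs.length) :
    pvCheckLoop (xs.take L) = decide (L ≤ pvLead xs) := by
  induction xs generalizing L with
  | nil =>
      simp at h
      subst h
      simp [pvCheckLoop, pvLead]
  | cons x xs ih =>
      cases L with
      | zero => simp [pvCheckLoop]
      | succ L =>
          simp only [List.length_cons, Nat.succ_le_succ_iff] at h
          rw [List.take_succ_cons, pvCheckLoop, pvLead]
          by_cases hg : is_digit_prime x = true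
          · simp [hg, ih L h]
          · rw [Bool.not_eq_true] at hg
            simp [hg]

lemma pvLead_drop (xs : List Int) (t : Nat) (h : t ≤ pvLead xs) :
    pvLead (xs.drop t) = pvLead xs - t := by
  induction xs generalizing t with
  | nil =>
      simp [pvLead] at h
      simp [h, pvLead]
  | cons x xs ih =>
      cases t with
      | zero => simp
      | succ t =>
          rw [pvLead] at h
          rw [List.drop_succ_cons, pvLead]
          split_ifs at h ⊢ with hg
          · rw [ih t (by omega)]
            omega
          · omega

lemma pvLead_take_good (xs : List Int) : ∀ y ∈ xs.take (pvLead xs), is_digit_prime y = true := by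
  induction xs with
  | nil => simp
  | cons x xs ih =>
      rw [pvLead]
      split_ifs with hg
      · intro y hy
        rw [List.take_succ_cons] at hy
        rcases List.mem_cons.mp hy with rfl | hy
        · exact hg
        · exact ih y hy
      · simp

lemma pvLead_drop_head_bad (xs : List Int) (z : Int) (rest : List Int)
    (h : xs.drop (pvLead xs) = z :: rest) : is_digit_prime z = false := by
  induction xs generalizing rest with
  | nil => simp [pvLead] at h
  | cons x xs ih =>
      rw [pvLead] at h
      split_ifs at h with hg
      · rw [List.drop_succ_cons] at h
        exact ih rest h
      · rw [List.drop_zero] at h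
        cases h
        simpa using hg


-- the two fold bodies of the ports, named for the proofs (definitionally the ports' lambdas)
def pvAstep (lst : List Int) (st : Int) (result : List Int) (dr : Int) : List Int :=
  let seg := PySem.List.slice lst (some st) (some (dr + 1))
  if pvCheckLoop seg = true then
    if dr - st + 1 > (result.length : Int) then seg else result
  else result

def pvBstep (st : Int × Int × Int) (p : Int × Int) : Int × Int × Int :=
  let cl : Int := if pvGoodAlt p.2 then st.2.2 + 1 else 0
  if cl > st.2.1 then (p.1 + 1 - cl, cl, cl) else (st.1, st.2.1, cl)

def pvWin (lst : List Int) (p : Nat × Nat) : List Int := (lst.drop p.1).take p.2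

lemma pvA_eq (lst : List Int) : get_longest_prime_digits lst =
    (PySem.List.pyRange 0 (lst.length : Int)).foldl
      (fun result st => (PySem.List.pyRange st (lst.length : Int)).foldl (pvAstep lst st) result) [] := rfl

lemma pvB_eq (lst : List Int) : get_longest_prime_digits_alt lst =
    (let s := (PySem.List.enumerate lst).foldl pvBstep (0, 0, 0)
     PySem.List.slice lst (some s.1) (some (s.1 + s.2.1))) := rfl

lemma pvAinner_eval (lst : List Int) (s : Nat) (hs : s ≤ lst.length) :
    ∀ (k j : Nat) (R : List Int), s ≤ j → j + k = lst.length →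
    (PySem.List.pyRange (j : Int) (lst.length : Int)).foldl (pvAstep lst (s : Int)) R =
    if pvLead (lst.drop s) > R.length ∧ j < s + pvLead (lst.drop s) then
      pvWin lst (s, pvLead (lst.drop s)) else R := by
  have hL : pvLead (lst.drop s) ≤ lst.length - s := by
    have := pvLead_le (lst.drop s)
    simpa using this
  intro k
  induction k with
  | zero =>
      intro j R hsj hjk
      rw [PySem.List.pyRange_one_eq_nil (by exact_mod_cast (show lst.length ≤ j by omega))]
      rw [List.foldl_nil, if_neg]
      rintro ⟨h1, h2⟩
      omega
  | succ k ih =>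
      intro j R hsj hjk
      have hjn : j < lst.length := by omega
      rw [PySem.List.pyRange_one_cons (by exact_mod_cast hjn),
          show ((j : Int) + 1) = ((j + 1 : Nat) : Int) by push_cast; ring,
          List.foldl_cons]
      have hseg : PySem.List.slice lst (some ((s : Nat) : Int)) (some (((j + 1 : Nat) : Nat) : Int))
          = (lst.drop s).take (j + 1 - s) := PySem.List.slice_natCast lst s (j + 1)
      have hstep : pvAstep lst (s : Int) R ((j + 1 : Nat) - 1 : Int) =
          if j + 1 - s ≤ pvLead (lst.drop s) ∧ j + 1 - s > R.length then
            (lst.drop s).take (j + 1 - s) else R := by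
        simp only [pvAstep]
        rw [show (((j + 1 : Nat) : Int) - 1 + 1) = ((j + 1 : Nat) : Int) by ring]
        rw [hseg, pvCheckLoop_take _ _ (by simp; omega)]
        by_cases hg : j + 1 - s ≤ pvLead (lst.drop s)
        · rw [if_pos (by simpa using hg)]
          by_cases hl : j + 1 - s > R.length
          · rw [if_pos (by push_cast; omega), if_pos ⟨hg, hl⟩]
          · rw [if_neg (by push_cast; omega), if_neg (by tauto)]
        · rw [if_neg (by simpa using hg), if_neg (by tauto)]
      rw [show ((j:Int)) = (((j+1:Nat):Int) - 1) by push_cast; ring, hstep]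
      by_cases hc : j + 1 - s ≤ pvLead (lst.drop s) ∧ j + 1 - s > R.length
      · rw [if_pos hc]
        have hlen' : ((lst.drop s).take (j + 1 - s)).length = j + 1 - s := by
          simp; omega
        rw [ih (j + 1) _ (by omega) (by omega), hlen']
        by_cases hc2 : pvLead (lst.drop s) > j + 1 - s
        · rw [if_pos ⟨hc2, by omega⟩, if_pos (by omega)]
        · have hLe : j + 1 - s = pvLead (lst.drop s) := by omega
          rw [if_neg (by omega), if_pos (by omega)]
          simp [pvWin, hLe]
      · rw [if_neg hc]
        rw [ih (j + 1) R (by omega) (by omega)]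
        rcases Decidable.not_and_iff_or_not.mp hc with h | h
        · have hiff : (pvLead (lst.drop s) > R.length ∧ j + 1 < s + pvLead (lst.drop s))
              ↔ (pvLead (lst.drop s) > R.length ∧ j < s + pvLead (lst.drop s)) := by
            constructor <;> rintro ⟨u, v⟩ <;> exact ⟨u, by omega⟩
          rw [if_congr hiff rfl rfl]
        · have hiff : (pvLead (lst.drop s) > R.length ∧ j + 1 < s + pvLead (lst.drop s))
              ↔ (pvLead (lst.drop s) > R.length ∧ j < s + pvLead (lst.drop s)) := by
            constructor <;> rintro ⟨u, v⟩ <;> exact ⟨u, by omega⟩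
          rw [if_congr hiff rfl rfl]

lemma pvA_noupdate (lst : List Int) : ∀ (sts : List Int) (R : List Int),
    (∀ st ∈ sts, ∃ s : Nat, st = (s : Int) ∧ s ≤ lst.length ∧ pvLead (lst.drop s) ≤ R.length) →
    sts.foldl (fun result st => (PySem.List.pyRange st (lst.length : Int)).foldl (pvAstep lst st) result) R = R := by
  intro sts
  induction sts with
  | nil => intro R _; rfl
  | cons st sts ih =>
      intro R h
      obtain ⟨s, rfl, hsn, hlead⟩ := h st (List.mem_cons_self)
      rw [List.foldl_cons]
      rw [pvAinner_eval lst s hsn (lst.length - s) s R (le_refl s) (by omega)]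
      rw [if_neg (by omega)]
      exact ih R (fun x hx => h x (List.mem_cons_of_mem _ hx))

lemma pvSpec_nil (i c : Nat) (b : Nat × Nat) : pvSpec [] i c b = b := by
  rw [pvSpec]
  simp

lemma pvAouter (lst : List Int) : ∀ (k j bs bl : Nat), j + k = lst.length → bs + bl ≤ j →
    (PySem.List.pyRange (j : Int) (lst.length : Int)).foldl
      (fun result st => (PySem.List.pyRange st (lst.length : Int)).foldl (pvAstep lst st) result)
      (pvWin lst (bs, bl)) =
    pvWin lst (pvSpec (lst.drop j) j 0 (bs, bl)) := by
  intro k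
  induction k using Nat.strong_induction_on with
  | _ k ih =>
  intro j bs bl hjk hble
  by_cases hnil : lst.drop j = []
  · have hj : lst.length ≤ j := by
      have := congrArg List.length hnil
      simp at this
      omega
    rw [hnil, PySem.List.pyRange_one_eq_nil (by exact_mod_cast hj), pvSpec]
    simp
  · have hjlt : j < lst.length := by
      rcases Nat.lt_or_ge j lst.length with h | h
      · exact h
      · exact absurd (List.drop_eq_nil_of_le h) hnil
    set m := pvLead (lst.drop j) with hm
    have hmlen : m ≤ lst.length - j := by
      have := pvLead_le (lst.drop j)
      simp at this
      omega
    set e := min (m + 1) (lst.length - j) with he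
    clear_value e
    have he1 : 1 ≤ e := by omega
    clear_value m
    have hwinm : (pvWin lst (j, m)).length = m := by simp [pvWin]; omega
    have hwinbl : (pvWin lst (bs, bl)).length = bl := by simp [pvWin]; omega
    rw [PySem.List.pyRange_one_append (j : Int) ((j + e : Nat) : Int) (lst.length : Int)
          (by exact_mod_cast Nat.le_add_right j e) (by exact_mod_cast (show j + e ≤ lst.length by omega)),
        List.foldl_append,
        PySem.List.pyRange_one_cons (by exact_mod_cast (show j < j + e by omega)),
        List.foldl_cons,
        pvAinner_eval lst j (le_of_lt hjlt) (lst.length - j) j _ (le_refl j) (by omega),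
        hwinbl]
    -- the positions strictly inside the run (and the bad element closing it) change nothing
    have hmid : ∀ (R : List Int), m ≤ R.length →
        (PySem.List.pyRange (((j + 1 : Nat)) : Int) ((j + e : Nat) : Int)).foldl
          (fun result st => (PySem.List.pyRange st (lst.length : Int)).foldl (pvAstep lst st) result) R = R := by
      intro R hR
      apply pvA_noupdate
      intro st hst
      rw [PySem.List.mem_pyRange_one] at hst
      obtain ⟨h1, h2⟩ := hst
      have h0 : 0 ≤ st := le_trans (by exact_mod_cast Nat.zero_le (j+1)) h1
      refine ⟨st.toNat, (Int.toNat_of_nonneg h0).symm, by omega, ?_⟩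
      have ht1 : j + 1 ≤ st.toNat := by omega
      have ht2 : st.toNat < j + e := by omega
      have hd : (lst.drop j).drop (st.toNat - j) = lst.drop st.toNat := by
        rw [List.drop_drop]
        congr 1
        omega
      have hlead := pvLead_drop (lst.drop j) (st.toNat - j) (by omega)
      rw [hd, ← hm] at hlead
      omega
    rw [show ((j : Int) + 1) = ((j + 1 : Nat) : Int) by push_cast; ring]
    have hdd : (e = m + 1 ∧ (List.drop j lst).drop (m + 1) = List.drop (j + e) lst) ∨
        ((List.drop j lst).drop (m + 1) = [] ∧ List.drop (j + e) lst = []) := by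
      rcases Nat.le_total (m + 1) (lst.length - j) with hc | hc
      · left
        refine ⟨by omega, ?_⟩
        rw [List.drop_drop]
        congr 1
        omega
      · right
        constructor
        · rw [List.drop_drop]
          exact List.drop_eq_nil_of_le (by omega)
        · exact List.drop_eq_nil_of_le (by omega)
    by_cases hup : m > bl
    · rw [if_pos ⟨by rw [← hm]; omega, by rw [← hm]; omega⟩]
      rw [← hm, hmid _ (by omega)]
      rw [ih (lst.length - (j + e)) (by omega) (j + e) j m (by omega) (by omega)]
      conv_rhs => rw [pvSpec]
      simp only [dif_neg hnil, ← hm, Nat.zero_add, Nat.sub_zero]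
      rw [if_pos hup]
      rcases hdd with ⟨hde, hdd⟩ | ⟨hd1, hd2⟩
      · rw [hdd, show j + e = j + m + 1 by omega]
      · rw [hd1, hd2, pvSpec_nil, pvSpec_nil]
    · rw [if_neg (by rw [← hm]; omega)]
      rw [hmid _ (by omega)]
      rw [ih (lst.length - (j + e)) (by omega) (j + e) bs bl (by omega) (by omega)]
      conv_rhs => rw [pvSpec]
      simp only [dif_neg hnil, ← hm, Nat.zero_add, Nat.sub_zero]
      rw [if_neg hup]
      rcases hdd with ⟨hde, hdd⟩ | ⟨hd1, hd2⟩
      · rw [hdd, show j + e = j + m + 1 by omega]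
      · rw [hd1, hd2, pvSpec_nil, pvSpec_nil]

lemma pvEnumerate_append (ys zs : List Int) (i : Int) :
    PySem.List.enumerate (ys ++ zs) i = PySem.List.enumerate ys i ++ PySem.List.enumerate zs (i + ys.length) := by
  induction ys generalizing i with
  | nil => simp [PySem.List.enumerate]
  | cons y ys ih =>
      simp only [List.cons_append, PySem.List.enumerate, List.length_cons]
      rw [ih]
      congr 2
      push_cast
      ring_nf

lemma pvBrun : ∀ (ys : List Int) (i b1 : Int) (bl cl : Nat),
    (∀ y ∈ ys, is_digit_prime y = true) → cl ≤ bl →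
    (PySem.List.enumerate ys i).foldl pvBstep (b1, (bl : Int), (cl : Int)) =
    ((if cl + ys.length > bl then i - (cl : Int) else b1),
      ((max bl (cl + ys.length) : Nat) : Int), ((cl + ys.length : Nat) : Int)) := by
  intro ys
  induction ys with
  | nil =>
      intro i b1 bl cl _ hcl
      simp only [PySem.List.enumerate, List.foldl_nil, List.length_nil, Nat.add_zero]
      rw [if_neg (by omega), Nat.max_eq_left hcl]
  | cons y ys ih =>
      intro i b1 bl cl hgood hcl
      have hy : pvGoodAlt y = true := by rw [pvGoodAlt_eq]; exact hgood y List.mem_cons_self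
      simp only [PySem.List.enumerate, List.foldl_cons]
      rw [show pvBstep (b1, (bl : Int), (cl : Int)) (i, y)
            = (if ((cl : Int) + 1 > (bl : Int)) then (i + 1 - ((cl : Int) + 1), (cl : Int) + 1, (cl : Int) + 1)
               else (b1, (bl : Int), (cl : Int) + 1)) by simp [pvBstep, hy]]
      by_cases hc : cl + 1 > bl
      · rw [if_pos (by omega)]
        rw [show ((cl : Int) + 1) = ((cl + 1 : Nat) : Int) by push_cast; ring]
        rw [ih (i + 1) (i + 1 - ((cl + 1 : Nat) : Int)) (cl + 1) (cl + 1)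
              (fun y hy => hgood y (List.mem_cons_of_mem _ hy)) (le_refl _)]
        refine Prod.ext ?_ (Prod.ext ?_ ?_) <;>
          simp only [List.length_cons] <;>
          (try split_ifs) <;>
          first | rfl | (push_cast; ring1) | (exfalso; omega) | (congr 1; omega)
      · rw [if_neg (by omega)]
        rw [show ((cl : Int) + 1) = ((cl + 1 : Nat) : Int) by push_cast; ring]
        rw [ih (i + 1) b1 bl (cl + 1)
              (fun y hy => hgood y (List.mem_cons_of_mem _ hy)) (by omega)]
        refine Prod.ext ?_ (Prod.ext ?_ ?_) <;>
          simp only [List.length_cons] <;>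
          (try split_ifs) <;>
          first | rfl | (push_cast; ring1) | (exfalso; omega) | (congr 1; omega)

lemma pvBmain : ∀ (k : Nat) (xs : List Int), xs.length = k → ∀ (i bs bl cl : Nat), cl ≤ bl → cl ≤ i →
    ((PySem.List.enumerate xs (i : Int)).foldl pvBstep ((bs : Int), (bl : Int), (cl : Int))).1
      = ((pvSpec xs i cl (bs, bl)).1 : Int) ∧
    ((PySem.List.enumerate xs (i : Int)).foldl pvBstep ((bs : Int), (bl : Int), (cl : Int))).2.1
      = ((pvSpec xs i cl (bs, bl)).2 : Int) := by
  intro k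
  induction k using Nat.strong_induction_on with
  | _ k ih =>
  intro xs hk i bs bl cl hcl hci
  by_cases hxs : xs = []
  · subst hxs
    rw [pvSpec_nil]
    exact ⟨rfl, rfl⟩
  · set m := pvLead xs with hm
    clear_value m
    have hmle : m ≤ xs.length := hm ▸ pvLead_le xs
    have htl : (xs.take m).length = m := by simp; omega
    have hsplit : PySem.List.enumerate xs (i : Int)
        = PySem.List.enumerate (xs.take m) (i : Int) ++ PySem.List.enumerate (xs.drop m) ((i : Int) + (m : Int)) := by
      conv_lhs => rw [← List.take_append_drop m xs]
      rw [pvEnumerate_append, htl]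
    rw [hsplit, List.foldl_append,
        pvBrun (xs.take m) (i : Int) (bs : Int) bl cl
          (by rw [hm]; exact pvLead_take_good xs) hcl,
        htl]
    rw [pvSpec]
    simp only [dif_neg hxs, ← hm]
    -- name the updated best pair
    have hb1 : (if cl + m > bl then (i : Int) - (cl : Int) else (bs : Int))
        = (((if cl + m > (bs, bl).2 then (i - cl, cl + m) else (bs, bl)).1 : Nat) : Int) := by
      simp only []
      split_ifs <;> push_cast <;> omega
    have hb2 : ((max bl (cl + m) : Nat) : Int)
        = (((if cl + m > (bs, bl).2 then (i - cl, cl + m) else (bs, bl)).2 : Nat) : Int) := by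
      simp only []
      split_ifs <;> push_cast <;> omega
    rcases hdrop : xs.drop m with _ | ⟨z, rest⟩
    · -- the run reaches the end of the list
      have hd1 : xs.drop (m + 1) = [] := by
        have h6 : (xs.drop m).drop 1 = [] := by rw [hdrop]; rfl
        rw [← h6, List.drop_drop]
      rw [hd1, pvSpec_nil]
      simp only [PySem.List.enumerate, List.foldl_nil]
      exact ⟨hb1, hb2⟩
    · -- a bad element closes the run, then recurse
      have hzbad : pvGoodAlt z = false := by
        rw [pvGoodAlt_eq]
        exact pvLead_drop_head_bad xs z rest (hm ▸ hdrop)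
      have hd1 : xs.drop (m + 1) = rest := by
        have h6 : (xs.drop m).drop 1 = rest := by rw [hdrop]; rfl
        rw [← h6, List.drop_drop]
      rw [hd1]
      simp only [PySem.List.enumerate, List.foldl_cons]
      rw [show pvBstep ((if cl + m > bl then (i : Int) - (cl : Int) else (bs : Int)),
            ((max bl (cl + m) : Nat) : Int), ((cl + m : Nat) : Int)) ((i : Int) + (m : Int), z)
          = ((if cl + m > bl then (i : Int) - (cl : Int) else (bs : Int)),
            ((max bl (cl + m) : Nat) : Int), ((0 : Nat) : Int)) by
        simp only [pvBstep, hzbad, Bool.false_eq_true, if_false]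
        rw [if_neg (by push_cast; omega)]
        norm_num]
      rw [hb1, hb2]
      have hrest : rest.length < k := by
        have := congrArg List.length hdrop
        simp at this
        omega
      have hoff : (i : Int) + (m : Int) + 1 = (((i + m + 1 : Nat)) : Int) := by push_cast; ring
      rw [hoff]
      exact ih rest.length hrest rest rfl (i + m + 1)
        ((if cl + m > (bs, bl).2 then (i - cl, cl + m) else (bs, bl)).1)
        ((if cl + m > (bs, bl).2 then (i - cl, cl + m) else (bs, bl)).2)
        0 (Nat.zero_le _) (Nat.zero_le _)

lemma pvMain (lst : List Int) : get_longest_prime_digits lst = get_longest_prime_digits_alt lst := by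
  have hA := pvAouter lst lst.length 0 0 0 (by omega) (by omega)
  simp only [Nat.cast_zero, List.drop_zero] at hA
  have hwin0 : pvWin lst (0, 0) = [] := rfl
  rw [hwin0] at hA
  obtain ⟨h1, h2⟩ := pvBmain lst.length lst rfl 0 0 0 0 (le_refl 0) (le_refl 0)
  simp only [Nat.cast_zero] at h1 h2
  rw [pvA_eq, pvB_eq]
  show _ = PySem.List.slice lst (some ((PySem.List.enumerate lst).foldl pvBstep (0, 0, 0)).1)
      (some (((PySem.List.enumerate lst).foldl pvBstep (0, 0, 0)).1
        + ((PySem.List.enumerate lst).foldl pvBstep (0, 0, 0)).2.1))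
  rw [hA, h1, h2]
  rw [show ((pvSpec lst 0 0 (0, 0)).1 : Int) + ((pvSpec lst 0 0 (0, 0)).2 : Int)
        = (((pvSpec lst 0 0 (0, 0)).1 + (pvSpec lst 0 0 (0, 0)).2 : Nat) : Int) by push_cast; ring]
  rw [PySem.List.slice_natCast]
  rw [show (pvSpec lst 0 0 (0, 0)).1 + (pvSpec lst 0 0 (0, 0)).2 - (pvSpec lst 0 0 (0, 0)).1
        = (pvSpec lst 0 0 (0, 0)).2 by omega]
  rfl

-- ===== VERDICT (by name: the statement is the Claim_ definition above) =====
theorem get_longest_prime_digits_spec : Claim_equal_get_longest_prime_digits := by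
  intro lst _
  exact pvMain lst
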